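-- pv_equiv track=rewrite | github.com/yingl/LintCodeInPython | watering-flowers.py | water_plants
-- ===== SOURCE A (Python) =====
-- from typing import (
--     List,
-- )
--
-- def water_plants(plants: List[int], capacity1: int, capacity2: int) -> int:
--     #
--     ret = 0
--     n = len(plants)
--     c1, c2 = 0, 0
--     n1, n2 = 0, n - 1
--     while n1 < n2:
--         if c1 < plants[n1]:
--             c1 = capacity1
--             ret += 1
--         if c2 < plants[n2]:
--             c2 = capacity2
--             ret += 1
--         c1 -= plants[n1]
--         c2 -= plants[n2]
--         n1 += 1
--         n2 -= 1
--     if (n1 == n2) and (plants[n1] > (c1 + c2)):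
--         return ret + 1
--     else:
--         return ret
-- ===== SOURCE B (Python) =====
-- def water_plants(plants, capacity1, capacity2):
--     n = len(plants)
--     m = n // 2
--     # prefix sums: S[i] = plants[0] + ... + plants[i-1]
--     S = [0]
--     s = 0
--     for p in plants:
--         s += p
--         S.append(s)
--     r = 0
--     # gardener 1 over the left half: refill at i iff S[i+1] exceeds the
--     # threshold t1 (= S at last refill + capacity1); leftover water is t1 - S[m]
--     t1 = 0
--     for i in range(m):
--         if S[i + 1] > t1:
--             t1 = S[i] + capacity1
--             r += 1
--     c1 = t1 - S[m]
--     # gardener 2 over the right half, by suffix sums S[n] - S[j]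
--     t2 = 0
--     for k in range(m):
--         j = n - 1 - k
--         if S[n] - S[j] > t2:
--             t2 = S[n] - S[j + 1] + capacity2
--             r += 1
--     c2 = t2 - (S[n] - S[n - m])
--     if n % 2 == 1 and plants[m] > c1 + c2:
--         r += 1
--     return r
-- ===== Notes on version B (the rewrite author's own statement) =====
-- stated objective: alternative
-- what changed: Replaces A's capacity simulation (a single interleaved two-pointer loop mutating two water levels) by a precomputed prefix-sum array with threshold bookkeeping: a refill for gardener 1 happens at i iff S[i+1] exceeds a running threshold (S at the last refill plus capacity1), symmetrically for gardener 2 via suffix sums S[n]-S[j]; leftover water is recovered in closed form as threshold minus prefix sum for the middle test.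
import Mathlib
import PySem

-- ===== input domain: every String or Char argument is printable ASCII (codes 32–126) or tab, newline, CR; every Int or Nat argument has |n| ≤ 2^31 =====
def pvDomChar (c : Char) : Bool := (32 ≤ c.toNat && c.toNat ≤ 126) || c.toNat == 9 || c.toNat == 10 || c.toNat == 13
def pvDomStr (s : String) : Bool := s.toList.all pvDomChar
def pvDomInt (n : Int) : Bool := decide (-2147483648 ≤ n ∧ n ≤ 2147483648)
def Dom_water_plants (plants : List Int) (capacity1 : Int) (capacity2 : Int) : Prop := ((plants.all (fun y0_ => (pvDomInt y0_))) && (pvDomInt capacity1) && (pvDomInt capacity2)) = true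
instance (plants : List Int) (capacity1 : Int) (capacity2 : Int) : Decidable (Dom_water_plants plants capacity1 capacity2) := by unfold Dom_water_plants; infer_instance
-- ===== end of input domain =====

-- B replaces A's interleaved two-pointer capacity simulation by a prefix-sum array
-- with refill thresholds (leftover water recovered in closed form); objective:
-- alternative algorithm, same O(n) cost.

-- ===== PORT A =====
-- A's while loop; every list access A performs is in range when reached (Python A
-- never raises), so pyGetD ... 0 is exact there.
def waterLoopA (plants : List Int) (capacity1 capacity2 : Int)
    (c1 c2 : Int) (n1 n2 : Int) (ret : Int) : Int :=
  if _h : n1 < n2 then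
    let p1 := PySem.List.pyGetD plants n1 0
    let p2 := PySem.List.pyGetD plants n2 0
    let c1a := if c1 < p1 then capacity1 else c1
    let ret1 := if c1 < p1 then ret + 1 else ret
    let c2a := if c2 < p2 then capacity2 else c2
    let ret2 := if c2 < p2 then ret1 + 1 else ret1
    waterLoopA plants capacity1 capacity2 (c1a - p1) (c2a - p2) (n1 + 1) (n2 - 1) ret2
  else if n1 = n2 ∧ PySem.List.pyGetD plants n1 0 > c1 + c2 then ret + 1 else ret
termination_by (n2 - n1).toNat
decreasing_by omega


def water_plants (plants : List Int) (capacity1 : Int) (capacity2 : Int) : Int :=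
  waterLoopA plants capacity1 capacity2 0 0 0 ((plants.length : Int) - 1) 0

-- ===== PORT B =====
-- Source B's prefix-sum building loop (S starts as [0]; each step appends the running sum)
def bPrefix (plants : List Int) : List Int :=
  (plants.foldl (fun (a : List Int × Int) p => (a.1 ++ [a.2 + p], a.2 + p)) ([0], (0 : Int))).1

-- Source B's first loop body (gardener 1, threshold t = st.1, refill count = st.2)
def bStep1 (S : List Int) (capacity1 : Int) (st : Int × Int) (i : Nat) : Int × Int :=
  if S.getD (i + 1) 0 > st.1 then (S.getD i 0 + capacity1, st.2 + 1) else st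

-- Source B's second loop body (gardener 2, via suffix sums S[n] - S[j], j = n-1-k)
def bStep2 (S : List Int) (n : Nat) (capacity2 : Int) (st : Int × Int) (k : Nat) : Int × Int :=
  let j := n - 1 - k
  if S.getD n 0 - S.getD j 0 > st.1 then (S.getD n 0 - S.getD (j + 1) 0 + capacity2, st.2 + 1) else st


def water_plants_alt (plants : List Int) (capacity1 : Int) (capacity2 : Int) : Int :=
  let n := plants.length
  let m := n / 2
  let S := bPrefix plants
  let g1 := (List.range m).foldl (bStep1 S capacity1) ((0 : Int), (0 : Int))
  let c1 := g1.1 - S.getD m 0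
  let g2 := (List.range m).foldl (bStep2 S n capacity2) ((0 : Int), g1.2)
  let c2 := g2.1 - (S.getD n 0 - S.getD (n - m) 0)
  if n % 2 = 1 ∧ PySem.List.pyGetD plants (m : Int) 0 > c1 + c2 then g2.2 + 1 else g2.2

-- ===== PRECONDITION & SPEC =====
def Spec_water_plants (plants : List Int) (capacity1 : Int) (capacity2 : Int) (out : Int) : Prop := out = water_plants_alt plants capacity1 capacity2
instance (plants : List Int) (capacity1 : Int) (capacity2 : Int) (out : Int) : Decidable (Spec_water_plants plants capacity1 capacity2 out) := by unfold Spec_water_plants; infer_instance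

-- ===== CLAIM (what is proved, stated in full; the proofs are below) =====
def Claim_equal_water_plants : Prop := ∀ (plants : List Int) (capacity1 : Int) (capacity2 : Int), Dom_water_plants plants capacity1 capacity2 → Spec_water_plants plants capacity1 capacity2 (water_plants plants capacity1 capacity2)

-- ===== LEMMAS AND PROOFS =====

-- one gardener's simulated step (used only to characterise A's loop)
def stepAlt (cap : Int) (s : Int × Int) (p : Int) : Int × Int :=
  if s.1 < p then (cap - p, s.2 + 1) else (s.1 - p, s.2)

-- list of prefix sums of xs starting at s
def plist (s : Int) : List Int → List Int
  | [] => [s]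
  | p :: xs => s :: plist (s + p) xs

-- threshold formulation of one gardener's pass: t = capacity base, s = running sum, r = refills
def threshFold (cap : Int) : Int → Int → Int → List Int → Int × Int
  | t, _, r, [] => (t, r)
  | t, s, r, p :: xs =>
      if s + p > t then threshFold cap (s + cap) (s + p) (r + 1) xs
      else threshFold cap t (s + p) r xs

theorem pg (l : List Int) (i : Int) (h0 : 0 ≤ i) (h1 : i < (l.length : Int)) :
    PySem.List.pyGetD l i 0 = l[i.toNat]'(by omega) := by
  rw [PySem.List.pyGetD, PySem.List.pyGet?, PySem.List.pyIdx?]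
  simp only [if_pos h0, if_pos h1, Option.bind_some,
    List.getElem?_eq_getElem (by omega : i.toNat < l.length), Option.getD_some]

theorem stepAlt_foldl_shift (cap : Int) (xs : List Int) (c r : Int) :
    xs.foldl (stepAlt cap) (c, r)
      = ((xs.foldl (stepAlt cap) (c, 0)).1, r + (xs.foldl (stepAlt cap) (c, 0)).2) := by
  induction xs generalizing c r with
  | nil => simp
  | cons x xs ih =>
    simp only [List.foldl_cons, stepAlt]
    split
    · rw [ih (cap - x) (r + 1), ih (cap - x) (0 + 1)]
      exact Prod.ext rfl (by ring)
    · rw [ih (c - x) r]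

theorem foldl_cons_shift (cap c p : Int) (xs : List Int) :
    (p :: xs).foldl (stepAlt cap) (c, 0)
      = ((xs.foldl (stepAlt cap) ((if c < p then cap else c) - p, 0)).1,
         (if c < p then (1:Int) else 0) + (xs.foldl (stepAlt cap) ((if c < p then cap else c) - p, 0)).2) := by
  simp only [List.foldl_cons, stepAlt]
  by_cases h : c < p
  · simp only [if_pos h]
    rw [stepAlt_foldl_shift cap xs (cap - p) (0 + 1)]
    exact Prod.ext rfl (by ring)
  · simp only [if_neg h]
    rw [stepAlt_foldl_shift cap xs (c - p) 0]
    exact Prod.ext rfl (by ring)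

theorem seg_cons (l : List Int) (a k : Nat) (h : a < l.length) :
    (l.drop a).take (k + 1) = l[a] :: ((l.drop (a + 1)).take k) := by
  rw [List.drop_eq_getElem_cons h]; rfl

theorem seg_snoc (l : List Int) (a k : Nat) (h : a + k < l.length) :
    (l.drop a).take (k + 1) = ((l.drop a).take k) ++ [l[a + k]] := by
  rw [List.take_add_one]
  have hk : k < (l.drop a).length := by simp; omega
  simp [List.getElem?_eq_getElem hk]

theorem waterLoopA_eq (plants : List Int) (cap1 cap2 : Int) :
    ∀ (k : Nat) (n1 n2 c1 c2 ret : Int),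
      0 ≤ n1 → n2 < (plants.length : Int) →
      (n2 - n1 + 1 = 2 * k ∨ n2 - n1 + 1 = 2 * k + 1) →
      waterLoopA plants cap1 cap2 c1 c2 n1 n2 ret =
        ret + ((plants.drop n1.toNat).take k |>.foldl (stepAlt cap1) (c1, 0)).2
            + (((plants.drop (n2 + 1 - k).toNat).take k).reverse.foldl (stepAlt cap2) (c2, 0)).2
            + (if n2 - n1 + 1 = 2 * k + 1 ∧
                  PySem.List.pyGetD plants (n1 + k) 0 >
                    ((plants.drop n1.toNat).take k |>.foldl (stepAlt cap1) (c1, 0)).1 +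
                    (((plants.drop (n2 + 1 - k).toNat).take k).reverse.foldl (stepAlt cap2) (c2, 0)).1
               then 1 else 0) := by
  intro k
  induction k with
  | zero =>
    intro n1 n2 c1 c2 ret h0 hlen hpar
    rw [waterLoopA, dif_neg (by omega)]
    simp only [List.take_zero, List.foldl_nil, List.reverse_nil, Nat.cast_zero, mul_zero,
      zero_add, add_zero]
    split_ifs with h1 h2 h2
    · omega
    · exact absurd ⟨by omega, h1.2⟩ h2
    · exact absurd ⟨by omega, h2.2⟩ h1
    · omega
  | succ k ih =>
    intro n1 n2 c1 c2 ret h0 hlen hpar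
    have hlt : n1 < n2 := by omega
    have hn1 : n1 < (plants.length : Int) := by omega
    have hp1 : PySem.List.pyGetD plants n1 0 = plants[n1.toNat]'(by omega) := pg _ _ h0 hn1
    have hp2 : PySem.List.pyGetD plants n2 0 = plants[n2.toNat]'(by omega) := pg _ _ (by omega) hlen
    have hLt : (n1 + 1).toNat = n1.toNat + 1 := by omega
    have hL : (plants.drop n1.toNat).take (k + 1)
        = plants[n1.toNat]'(by omega) :: ((plants.drop (n1 + 1).toNat).take k) := by
      rw [hLt]; exact seg_cons _ _ _ (by omega)
    have hRa : (n2 + 1 - ((k:Int) + 1)).toNat + k = n2.toNat := by omega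
    have hR : ((plants.drop (n2 + 1 - ((k:Int) + 1)).toNat).take (k + 1)).reverse
        = plants[n2.toNat]'(by omega) :: ((plants.drop ((n2 - 1) + 1 - (k:Int)).toNat).take k).reverse := by
      have h1 : (n2 + 1 - ((k:Int) + 1)).toNat = ((n2 - 1) + 1 - (k:Int)).toNat := by omega
      rw [seg_snoc _ _ _ (by omega : (n2 + 1 - ((k:Int) + 1)).toNat + k < plants.length)]
      rw [List.reverse_append, List.reverse_singleton]
      simp only [List.singleton_append]
      congr 1
      · congr 1
      · exact congrArg (fun a => ((plants.drop a).take k).reverse) h1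
    rw [waterLoopA, dif_pos hlt]
    dsimp only
    rw [hp1, hp2]
    rw [ih (n1 + 1) (n2 - 1) _ _ _ (by omega) (by omega) (by omega)]
    push_cast
    rw [hL, hR, foldl_cons_shift, foldl_cons_shift]
    have hidx : n1 + 1 + (k:Int) = n1 + ((k:Int) + 1) := by ring
    have hiff : ((n2 - 1) - (n1 + 1) + 1 = 2 * (k:Int) + 1) ↔ (n2 - n1 + 1 = 2 * ((k:Int) + 1) + 1) := by
      omega
    rw [hidx]
    rw [if_congr (and_congr_left' hiff) rfl rfl]
    dsimp only
    split_ifs <;> ring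

-- the building loop of Source B produces the prefix-sum list
theorem bPrefix_aux (xs : List Int) : ∀ (acc : List Int) (s : Int),
    xs.foldl (fun (a : List Int × Int) p => (a.1 ++ [a.2 + p], a.2 + p)) (acc ++ [s], s)
      = (acc ++ plist s xs, s + xs.sum) := by
  induction xs with
  | nil => intro acc s; simp [plist]
  | cons p xs ih =>
    intro acc s
    simp only [List.foldl_cons]
    have h2 := ih (acc ++ [s]) (s + p)
    simp only [List.append_assoc, List.singleton_append] at h2 ⊢
    rw [h2]
    simp [plist]
    ring

theorem bPrefix_eq (plants : List Int) : bPrefix plants = plist 0 plants := by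
  unfold bPrefix
  have := bPrefix_aux plants [] 0
  simp only [List.nil_append] at this
  rw [this]

theorem plist_getD (xs : List Int) : ∀ (s : Int) (i : Nat), i ≤ xs.length →
    (plist s xs).getD i 0 = s + (xs.take i).sum := by
  induction xs with
  | nil =>
    intro s i h
    simp only [List.length_nil, Nat.le_zero] at h
    subst h
    simp [plist]
  | cons p xs ih =>
    intro s i h
    cases i with
    | zero => simp [plist]
    | succ i =>
      simp only [plist, List.getD_cons_succ, List.take_succ_cons, List.sum_cons]
      rw [ih (s + p) i (by simpa using h)]
      ring

-- threshold fold: appending one plant at the end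
theorem TF_snoc (cap : Int) (xs : List Int) : ∀ (t s r p : Int),
    threshFold cap t s r (xs ++ [p])
      = (if s + xs.sum + p > (threshFold cap t s r xs).1
         then (s + xs.sum + cap, (threshFold cap t s r xs).2 + 1)
         else threshFold cap t s r xs) := by
  induction xs with
  | nil =>
    intro t s r p
    simp [threshFold]
  | cons q xs ih =>
    intro t s r p
    simp only [List.cons_append, threshFold, List.sum_cons]
    have e : ∀ x : Int, s + q + x = s + (q + x) := fun x => by ring
    by_cases h : s + q > t
    · simp only [if_pos h]
      rw [ih, e]
    · simp only [if_neg h]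
      rw [ih, e]

-- refill count of threshFold is a shift
theorem TF_shift (cap : Int) (xs : List Int) : ∀ (t s r : Int),
    threshFold cap t s r xs
      = ((threshFold cap t s 0 xs).1, r + (threshFold cap t s 0 xs).2) := by
  induction xs with
  | nil => intro t s r; simp [threshFold]
  | cons p xs ih =>
    intro t s r
    simp only [threshFold]
    split_ifs with h
    · rw [ih (s + cap) (s + p) (r + 1), ih (s + cap) (s + p) (0 + 1)]
      exact Prod.ext rfl (by ring)
    · rw [ih t (s + p) r]

-- the capacity simulation equals the threshold formulation
theorem SA_TF (cap : Int) (xs : List Int) : ∀ (t s r : Int),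
    xs.foldl (stepAlt cap) (t - s, r)
      = ((threshFold cap t s r xs).1 - (s + xs.sum), (threshFold cap t s r xs).2) := by
  induction xs with
  | nil => intro t s r; simp [threshFold]
  | cons p xs ih =>
    intro t s r
    simp only [List.foldl_cons, stepAlt, threshFold, List.sum_cons]
    by_cases h : s + p > t
    · rw [if_pos (by omega), if_pos h]
      have e : cap - p = (s + cap) - (s + p) := by ring
      rw [e, ih (s + cap) (s + p) (r + 1)]
      exact Prod.ext (by ring_nf) rfl
    · rw [if_neg (by omega), if_neg h]
      have e : t - s - p = t - (s + p) := by ring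
      rw [e, ih t (s + p) r]
      exact Prod.ext (by ring_nf) rfl

-- Source B's first loop equals the threshold fold over the left segment
theorem g1_eq (plants : List Int) (cap : Int) : ∀ (len : Nat), len ≤ plants.length →
    ∀ (t r : Int),
    (List.range len).foldl (bStep1 (plist 0 plants) cap) (t, r)
      = threshFold cap t 0 r (plants.take len) := by
  intro len
  induction len with
  | zero => intro _ t r; simp [threshFold]
  | succ len ih =>
    intro h t r
    rw [List.range_succ, List.foldl_append, ih (by omega)]
    have htk : plants.take (len + 1) = plants.take len ++ [plants[len]'(by omega)] := by
      have h0 := seg_snoc plants 0 len (by omega)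
      simp only [List.drop_zero, Nat.zero_add] at h0
      exact h0
    rw [htk, TF_snoc]
    simp only [List.foldl_cons, List.foldl_nil, bStep1]
    have hs1 : (plist 0 plants).getD (len + 1) 0 = 0 + (plants.take (len + 1)).sum :=
      plist_getD plants 0 (len + 1) (by omega)
    have hs0 : (plist 0 plants).getD len 0 = 0 + (plants.take len).sum :=
      plist_getD plants 0 len (by omega)
    have hsum : (plants.take (len + 1)).sum = (plants.take len).sum + plants[len]'(by omega) := by
      rw [htk, List.sum_append, List.sum_singleton]
    rw [hs1, hs0, hsum]
    have hc : (0 : Int) + ((plants.take len).sum + plants[len]'(by omega))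
        = 0 + (plants.take len).sum + plants[len]'(by omega) := by ring
    rw [hc]

-- Source B's second loop equals the threshold fold over the reversed right segment
theorem g2_eq (plants : List Int) (cap : Int) : ∀ (len : Nat), len ≤ plants.length →
    ∀ (t r : Int),
    (List.range len).foldl (bStep2 (plist 0 plants) plants.length cap) (t, r)
      = threshFold cap t 0 r ((plants.drop (plants.length - len)).reverse) := by
  intro len
  induction len with
  | zero => intro _ t r; simp [threshFold]
  | succ len ih =>
    intro h t r
    rw [List.range_succ, List.foldl_append, ih (by omega)]
    set n := plants.length with hn
    have hj : n - 1 - len + 1 = n - len := by omega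
    have hdrop : plants.drop (n - (len + 1)) = plants[n - 1 - len]'(by omega) :: plants.drop (n - len) := by
      have h1 : n - (len + 1) = n - 1 - len := by omega
      have h2 : n - 1 - len + 1 = n - len := by omega
      rw [h1, List.drop_eq_getElem_cons (show n - 1 - len < plants.length by omega), h2]
    have hrev : (plants.drop (n - (len + 1))).reverse
        = (plants.drop (n - len)).reverse ++ [plants[n - 1 - len]'(by omega)] := by
      rw [hdrop, List.reverse_cons]
    rw [hrev, TF_snoc]
    simp only [List.foldl_cons, List.foldl_nil, bStep2]
    have hsumdrop : ∀ (a : Nat), a ≤ n → (plants.drop a).sum = plants.sum - (plants.take a).sum := by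
      intro a _
      have := List.sum_take_add_sum_drop plants a
      omega
    have hSn : (plist 0 plants).getD n 0 = 0 + (plants.take n).sum :=
      plist_getD plants 0 n (by omega)
    have hSnl : (plist 0 plants).getD (n - len) 0 = 0 + (plants.take (n - len)).sum :=
      plist_getD plants 0 (n - len) (by omega)
    have hSj : (plist 0 plants).getD (n - 1 - len) 0 = 0 + (plants.take (n - 1 - len)).sum :=
      plist_getD plants 0 (n - 1 - len) (by omega)
    have htakej : plants.take (n - len) = plants.take (n - 1 - len) ++ [plants[n - 1 - len]'(by omega)] := by
      have h0 := seg_snoc plants 0 (n - 1 - len) (by omega)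
      simp only [List.drop_zero, Nat.zero_add] at h0
      rw [← hj, h0]
    have hsumj : (plants.take (n - len)).sum
        = (plants.take (n - 1 - len)).sum + plants[n - 1 - len]'(by omega) := by
      rw [htakej, List.sum_append, List.sum_singleton]
    have htaken : plants.take n = plants := List.take_of_length_le (by omega)
    have hrsum : ((plants.drop (n - len)).reverse).sum = (plants.drop (n - len)).sum := by
      simp
    rw [hj, hSn, hSnl, hSj, htaken, hrsum, hsumdrop (n - len) (by omega), hsumj]
    have e1 : (0 : Int) + plants.sum - (0 + (plants.take (n - 1 - len)).sum)
        = 0 + (plants.sum - ((plants.take (n - 1 - len)).sum + plants[n - 1 - len]'(by omega)))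
            + plants[n - 1 - len]'(by omega) := by ring
    have e2 : (0 : Int) + plants.sum
          - (0 + ((plants.take (n - 1 - len)).sum + plants[n - 1 - len]'(by omega))) + cap
        = 0 + (plants.sum - ((plants.take (n - 1 - len)).sum + plants[n - 1 - len]'(by omega)))
            + cap := by ring
    rw [e1, e2]

theorem water_plants_eq_alt (plants : List Int) (capacity1 capacity2 : Int) :
    water_plants plants capacity1 capacity2 = water_plants_alt plants capacity1 capacity2 := by
  unfold water_plants water_plants_alt
  rw [bPrefix_eq]
  rw [waterLoopA_eq plants capacity1 capacity2 (plants.length / 2) 0 ((plants.length : Int) - 1)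
      0 0 0 (by omega) (by omega) (by omega)]
  dsimp only
  rw [g1_eq plants capacity1 (plants.length / 2) (by omega),
      g2_eq plants capacity2 (plants.length / 2) (by omega)]
  have e0 : (Int.toNat 0) = 0 := rfl
  rw [e0, List.drop_zero]
  have e1 : ((plants.length : Int) - 1 + 1 - ((plants.length / 2 : Nat) : Int)).toNat
      = plants.length - plants.length / 2 := by omega
  rw [e1]
  have e2 : (plants.drop (plants.length - plants.length / 2)).take (plants.length / 2)
      = plants.drop (plants.length - plants.length / 2) :=
    List.take_of_length_le (by simp; omega)
  rw [e2]
  have hiff : ((plants.length : Int) - 1 - 0 + 1 = 2 * ((plants.length / 2 : Nat) : Int) + 1)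
      ↔ (plants.length % 2 = 1) := by omega
  have e3 : (0 : Int) + ((plants.length / 2 : Nat) : Int) = ((plants.length / 2 : Nat) : Int) := by
    ring
  rw [e3, if_congr (and_congr_left' hiff) rfl rfl]
  rw [plist_getD plants 0 (plants.length / 2) (by omega),
      plist_getD plants 0 plants.length (le_refl _),
      plist_getD plants 0 (plants.length - plants.length / 2) (by omega)]
  rw [List.take_length]
  rw [TF_shift capacity2 ((plants.drop (plants.length - plants.length / 2)).reverse) 0 0
      (threshFold capacity1 0 0 0 (plants.take (plants.length / 2))).2]
  have key : ∀ (cap : Int) (xs : List Int),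
      xs.foldl (stepAlt cap) ((0 : Int), (0 : Int))
        = ((threshFold cap 0 0 0 xs).1 - xs.sum, (threshFold cap 0 0 0 xs).2) := by
    intro cap xs
    have h := SA_TF cap xs 0 0 0
    have e : (0 : Int) - 0 = 0 := by ring
    rw [e] at h
    rw [h]
    have e' : (0 : Int) + xs.sum = xs.sum := by ring
    rw [e']
  rw [key capacity1 (plants.take (plants.length / 2)),
      key capacity2 ((plants.drop (plants.length - plants.length / 2)).reverse)]
  have hrs : ((plants.drop (plants.length - plants.length / 2)).reverse).sum
      = plants.sum - (plants.take (plants.length - plants.length / 2)).sum := by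
    rw [List.sum_reverse]
    have h := List.sum_take_add_sum_drop plants (plants.length - plants.length / 2)
    omega
  rw [hrs]
  dsimp only
  simp only [zero_add]
  split_ifs with h1 <;> ring

-- ===== VERDICT (by name: the statement is the Claim_ definition above) =====
theorem water_plants_spec : Claim_equal_water_plants := by
  intro plants capacity1 capacity2 _
  unfold Spec_water_plants
  exact water_plants_eq_alt plants capacity1 capacity2
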